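-- pv_equiv track=rewrite | github.com/memory-eight-way/memory | quiz/make-quiz.py | proc_txt_lv30_39_mask_short_word
-- ===== SOURCE A (Python) =====
-- MASK_CHAR="_"
--
-- def is_memory_line(line_info):
--     """
--     記憶対象の行かを確認する
--     行番号. 文章 の構成になっているか
--     """
--     if len(line_info)!=2:
--         # 行番号＋文章の構成でない
--         return False
--
--     if line_info[1].strip()=="":
--         # 行番号＋文章の構成だけど 文章が空
--         return False
--     return True
--
-- def proc_line_mask_short_word (line,lv,slv):
--     """
--     lv30 短い単語を消す
--         lv30 短い単語を1単語以上消す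
--         lv31 短い単語を2単語以上消す
--         lv39 短い単語を10単語以上消す
--     """
--
--     di_len=make_len_dict(line)
--     wlenkeys=di_len.keys()
--     wlenkeys=sorted(wlenkeys,reverse=False)
--     wwordcounter=0
--     w_del_count=lv-slv+1
--     w_del_len=0
--     for wchklen in wlenkeys:
--         wwordcounter=wwordcounter+di_len[wchklen]
--         if wwordcounter>w_del_count:
--             w_del_len=wchklen
--             break
--     #if w_del_len==0:
--     #    return ""
--     w_words=line.split(" ")
--     w_ret=list()
--     for w_word in w_words:
--         if len(w_word)<=w_del_len:
--             w_ret.append(MASK_CHAR*len(w_word))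
--         else:
--             w_ret.append(w_word)
--     return " ".join(w_ret)
--
-- def proc_txt_lv30_39_mask_short_word(lines,lv):
--     w_ret=list()
--
--     wcount=0
--     for line in lines:
--         line_info=line_to_number_body_pair(line)
--         if is_memory_line(line_info):
--             w_new_line=line_info[0]+" "+proc_line_mask_short_word(line_info[1],lv,30)
--             w_ret.append(w_new_line)
--         else:
--             w_ret.append(line)
--     return w_ret
--
-- def make_len_dict(line):
--     w_words=line.split(" ")
--     di_len=dict()
--     for wele in w_words:
--         wlen=len(wele)
--         if wlen not in di_len:
--             di_len[wlen]=0
--         di_len[wlen]=di_len[wlen]+1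
--     return di_len
--
-- def line_to_number_body_pair(wline):
--     w_word=wline.strip().split(".")
--     w_line_number=w_word[0]+"."
--     w_line_body=".".join(w_word[1:]).strip()
--     return (w_line_number ,w_line_body)
-- ===== SOURCE B (Python) =====
-- MASK_CHAR = "_"
--
-- def proc_txt_lv30_39_mask_short_word(lines, lv):
--     out = []
--     for line in lines:
--         parts = line.strip().split(".")
--         number = parts[0] + "."
--         body = ".".join(parts[1:]).strip()
--         if body.strip() == "":
--             out.append(line)
--             continue
--         words = body.split(" ")
--         lengths = sorted(len(w) for w in words)
--         k = max(lv - 30 + 1, 0)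
--         w_del_len = lengths[k] if k < len(lengths) else 0
--         masked = " ".join(MASK_CHAR * len(w) if len(w) <= w_del_len else w
--                           for w in words)
--         out.append(number + " " + masked)
--     return out
-- ===== Notes on version B (the rewrite author's own statement) =====
-- stated objective: simpler
-- what changed: Replaces A's per-line length-histogram dict plus accumulate-until-threshold loop by a direct order statistic: sort the word lengths once and index the (lv-29)-th element (0 when out of range), keeping the split/mask flow.
import Mathlib
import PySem

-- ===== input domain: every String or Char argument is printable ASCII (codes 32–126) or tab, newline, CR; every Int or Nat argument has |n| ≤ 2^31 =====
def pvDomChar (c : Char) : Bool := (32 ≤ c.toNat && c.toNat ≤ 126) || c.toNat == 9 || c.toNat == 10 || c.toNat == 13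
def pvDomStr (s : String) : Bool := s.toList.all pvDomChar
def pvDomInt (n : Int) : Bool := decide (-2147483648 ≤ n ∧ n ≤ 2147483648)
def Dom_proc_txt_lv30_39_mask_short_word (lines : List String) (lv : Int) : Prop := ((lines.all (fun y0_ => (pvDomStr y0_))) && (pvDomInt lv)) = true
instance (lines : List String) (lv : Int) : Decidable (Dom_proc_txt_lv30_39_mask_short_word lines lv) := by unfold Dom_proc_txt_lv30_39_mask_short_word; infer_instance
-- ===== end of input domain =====

-- B replaces A's length-histogram dict and accumulate-until-threshold loop by a direct order
-- statistic on the sorted word-length list (simpler); both programs are total, return values agree everywhere.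

-- s.split(sep) for a nonempty literal sep: split? is some there, the default is never taken
def pySplit (s sep : String) : List String := (PySem.Str.split? s sep).getD [s]

-- '_' * n  (MASK_CHAR * len(w))
def maskOf (n : Int) : String := String.ofList (List.replicate n.toNat '_')

-- ===== PORT A =====
def line_to_number_body_pair (wline : String) : String × String :=
  let w_word := pySplit (PySem.Str.strip wline) "."
  let w_line_number := PySem.List.pyGetD w_word 0 "" ++ "."   -- w_word[0]: split? always yields a nonempty list
  let w_line_body := PySem.Str.strip (PySem.Str.join "." (PySem.List.slice w_word (some 1) none))
  (w_line_number, w_line_body)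

def is_memory_line (line_info : String × String) : Bool :=
  -- 'len(line_info) != 2' is identically false on a pair, so only the body test remains
  if PySem.Str.strip line_info.2 == "" then false else true

def make_len_dict (line : String) : PySem.Dict Int Int :=
  let w_words := pySplit line " "
  w_words.foldl (fun di_len wele =>
    let wlen := PySem.Str.len wele
    let di_len := if di_len.contains wlen then di_len else di_len.insert wlen 0
    di_len.insert wlen (di_len.getD wlen 0 + 1)) PySem.Dict.empty

-- the accumulate-until-threshold loop of proc_line_mask_short_word (with break)
def find_del_len (wlenkeys : List Int) (di_len : PySem.Dict Int Int) (wwordcounter w_del_count : Int) : Int :=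
  match wlenkeys with
  | [] => 0
  | wchklen :: rest =>
      let c := wwordcounter + di_len.getD wchklen 0
      if c > w_del_count then wchklen else find_del_len rest di_len c w_del_count

def proc_line_mask_short_word (line : String) (lv slv : Int) : String :=
  let di_len := make_len_dict line
  let wlenkeys := PySem.List.sorted di_len.keys (fun x => x) false
  let w_del_count := lv - slv + 1
  let w_del_len := find_del_len wlenkeys di_len 0 w_del_count
  let w_words := pySplit line " "
  let w_ret := w_words.foldl (fun acc w_word =>
    if PySem.Str.len w_word ≤ w_del_len then acc ++ [maskOf (PySem.Str.len w_word)]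
    else acc ++ [w_word]) []
  PySem.Str.join " " w_ret

def proc_txt_lv30_39_mask_short_word (lines : List String) (lv : Int) : List String :=
  lines.foldl (fun w_ret line =>
    let line_info := line_to_number_body_pair line
    if is_memory_line line_info then
      w_ret ++ [line_info.1 ++ " " ++ proc_line_mask_short_word line_info.2 lv 30]
    else
      w_ret ++ [line]) []

-- ===== PORT B =====
def proc_txt_lv30_39_mask_short_word_alt (lines : List String) (lv : Int) : List String :=
  lines.map (fun line =>
    let parts := pySplit (PySem.Str.strip line) "."
    let number := PySem.List.pyGetD parts 0 "" ++ "."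
    let body := PySem.Str.strip (PySem.Str.join "." (PySem.List.slice parts (some 1) none))
    if PySem.Str.strip body == "" then line
    else
      let words := pySplit body " "
      let lengths := PySem.List.sorted (words.map PySem.Str.len) (fun x => x) false
      let k := max (lv - 30 + 1) 0
      let w_del_len := if k < (lengths.length : Int) then PySem.List.pyGetD lengths k 0 else 0
      let masked := PySem.Str.join " " (words.map (fun w =>
        if PySem.Str.len w ≤ w_del_len then maskOf (PySem.Str.len w) else w))
      number ++ " " ++ masked)

-- ===== PRECONDITION & SPEC =====
def Spec_proc_txt_lv30_39_mask_short_word (lines : List String) (lv : Int) (out : List String) : Prop := out = proc_txt_lv30_39_mask_short_word_alt lines lv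
instance (lines : List String) (lv : Int) (out : List String) : Decidable (Spec_proc_txt_lv30_39_mask_short_word lines lv out) := by unfold Spec_proc_txt_lv30_39_mask_short_word; infer_instance

-- ===== CLAIM (what is proved, stated in full; the proofs are below) =====
def Claim_equal_proc_txt_lv30_39_mask_short_word : Prop := ∀ (lines : List String) (lv : Int), Dom_proc_txt_lv30_39_mask_short_word lines lv → Spec_proc_txt_lv30_39_mask_short_word lines lv (proc_txt_lv30_39_mask_short_word lines lv)

-- ===== LEMMAS AND PROOFS =====

-- A's histogram fold is collections.Counter of the word lengths
theorem hist_step (d : PySem.Dict Int Int) (n : Int) :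
    (if d.contains n then d else d.insert n 0).insert n
      ((if d.contains n then d else d.insert n 0).getD n 0 + 1) =
    d.insert n (d.getD n 0 + 1) := by
  by_cases h : d.contains n
  · simp [h]
  · simp only [h, if_false, Bool.false_eq_true]
    rw [PySem.Dict.getD_insert_self, PySem.Dict.insert_insert_self,
      PySem.Dict.getD_of_not_contains d (0:Int) (by simp [h])]

theorem foldl_hist (l : List String) (d : PySem.Dict Int Int) :
    l.foldl (fun di_len wele =>
      let wlen := PySem.Str.len wele
      let di_len := if di_len.contains wlen then di_len else di_len.insert wlen 0
      di_len.insert wlen (di_len.getD wlen 0 + 1)) d =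
    l.foldl (fun di w => di.insert (PySem.Str.len w) (di.getD (PySem.Str.len w) 0 + 1)) d := by
  induction l generalizing d with
  | nil => rfl
  | cons w t ih => simp only [List.foldl_cons]; rw [hist_step d (PySem.Str.len w)]; exact ih _


theorem make_len_dict_eq_counter (line : String) :
    make_len_dict line = PySem.Dict.counter ((pySplit line " ").map PySem.Str.len) := by
  unfold make_len_dict
  rw [← PySem.Dict.foldl_insert_getD_add_one_eq_counter, List.foldl_map]
  exact foldl_hist _ _

theorem count_flatMap_rep (c : Int → Nat) (v : Int) :
    ∀ (K : List Int), K.Nodup →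
    (K.flatMap (fun k => List.replicate (c k) k)).count v = if v ∈ K then c v else 0 := by
  intro K
  induction K with
  | nil => simp
  | cons k t ih =>
    intro hnd
    simp only [List.flatMap_cons, List.count_append, List.count_replicate, ih hnd.of_cons]
    by_cases hv : v = k
    · subst hv
      simp [(List.nodup_cons.mp hnd).1]
    · simp [hv, Ne.symm hv, List.mem_cons]

theorem pairwise_flatMap_rep (c : Int → Nat) :
    ∀ (K : List Int), K.Pairwise (· < ·) →
    (K.flatMap (fun k => List.replicate (c k) k)).Pairwise (· ≤ ·) := by
  intro K
  induction K with
  | nil => simp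
  | cons k t ih =>
    intro hp
    simp only [List.flatMap_cons]
    refine List.pairwise_append.mpr ⟨?_, ih hp.of_cons, ?_⟩
    · exact List.pairwise_replicate.mpr (Or.inr le_rfl)
    · intro x hx y hy
      rw [List.eq_of_mem_replicate hx]
      rcases List.mem_flatMap.mp hy with ⟨k', hk', hy'⟩
      rw [List.eq_of_mem_replicate hy']
      exact le_of_lt (List.rel_of_pairwise_cons hp hk')

theorem sorted_eq_flatMap_replicate (ls : List Int) :
    (PySem.List.sorted ls (fun x => x) false) =
      (PySem.List.sorted (PySem.Set.ofList ls) (fun x => x) false).flatMap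
        (fun k => List.replicate (ls.count k) k) := by
  have hndK : (PySem.List.sorted (PySem.Set.ofList ls) (fun x => x) false).Nodup :=
    ((PySem.List.sorted_perm (PySem.Set.ofList ls) (fun x => x) false).symm).nodup
      (PySem.Set.nodup_ofList ls)
  apply PySem.List.sorted_id_eq_of_perm_of_pairwise
  · refine List.perm_iff_count.mpr (fun v => ?_)
    rw [count_flatMap_rep _ v _ hndK]
    by_cases hv : v ∈ ls
    · simp [PySem.List.mem_sorted, PySem.Set.mem_ofList, hv]
    · simp [PySem.List.mem_sorted, PySem.Set.mem_ofList, hv, List.count_eq_zero.mpr hv]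
  · exact pairwise_flatMap_rep _ _ (PySem.List.sorted_ofList_pairwise_lt ls)

theorem find_del_len_spec (ls : List Int) :
    ∀ (K : List Int), K.Pairwise (· < ·) → (∀ k ∈ K, k ∈ ls) → ∀ (cnt t : Int),
    find_del_len K (PySem.Dict.counter ls) cnt t =
      (if max (t - cnt) 0 < ((K.flatMap (fun k => List.replicate (ls.count k) k)).length : Int)
       then PySem.List.pyGetD (K.flatMap (fun k => List.replicate (ls.count k) k)) (max (t - cnt) 0) 0
       else 0) := by
  intro K
  induction K with
  | nil => intro _ _ cnt t; simp [find_del_len]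
  | cons k rest ih =>
    intro hp hm cnt t
    have hc1 : 0 < ls.count k := List.count_pos_iff.mpr (hm k (List.mem_cons_self))
    simp only [find_del_len, PySem.Dict.getD_counter, List.flatMap_cons]
    set s' := rest.flatMap (fun k => List.replicate (ls.count k) k) with hs'
    have hlen : ((List.replicate (ls.count k) k ++ s').length : Int)
        = (ls.count k : Int) + (s'.length : Int) := by
      simp
    by_cases hgt : cnt + (ls.count k : Int) > t
    · rw [if_pos hgt]
      have hu0 : (0:Int) ≤ max (t - cnt) 0 := le_max_right _ _
      have huc : max (t - cnt) 0 < (ls.count k : Int) := by omega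
      rw [if_pos (by rw [hlen]; omega)]
      rw [PySem.List.pyGetD_eq_getElem _ _ hu0 (by rw [hlen]; omega)]
      have hn : (max (t - cnt) 0).toNat < ls.count k := by omega
      rw [List.getElem_append_left (by simpa using hn)]
      simp
    · rw [if_neg hgt]
      have hrec := ih hp.of_cons (fun x hx => hm x (List.mem_cons_of_mem _ hx)) (cnt + (ls.count k : Int)) t
      rw [hrec]
      have hu : (ls.count k : Int) ≤ t - cnt := by omega
      have h1 : max (t - (cnt + (ls.count k : Int))) 0 = (t - cnt) - (ls.count k : Int) := by omega
      have h2 : max (t - cnt) 0 = t - cnt := by omega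
      rw [h1, h2]
      by_cases hin : (t - cnt) - (ls.count k : Int) < (s'.length : Int)
      · rw [if_pos hin, if_pos (by rw [hlen]; omega)]
        rw [PySem.List.pyGetD_eq_getElem _ _ (by omega) hin]
        rw [PySem.List.pyGetD_eq_getElem _ _ (by omega) (by rw [hlen]; omega)]
        rw [List.getElem_append_right (by simp; omega)]
        simp only [List.length_replicate]
        congr 1
        omega
      · rw [if_neg hin, if_neg (by rw [hlen]; omega)]

-- appending either f x or g x each step is a map
theorem foldl_if_append_pair {A B : Type} (p : A → Prop) [DecidablePred p] (f g : A → B) :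
    ∀ (l : List A) (acc : List B),
    l.foldl (fun acc x => if p x then acc ++ [f x] else acc ++ [g x]) acc
      = acc ++ l.map (fun x => if p x then f x else g x) := by
  intro l
  induction l with
  | nil => simp
  | cons x t ih =>
    intro acc
    simp only [List.foldl_cons, List.map_cons]
    by_cases h : p x
    · rw [if_pos h, if_pos h, ih]; simp
    · rw [if_neg h, if_neg h, ih]; simp

-- the cumulative-count loop of A, run on its own histogram, is B's order statistic
theorem del_len_eq (line : String) (t : Int) :
    find_del_len (PySem.List.sorted (make_len_dict line).keys (fun x => x) false)
        (make_len_dict line) 0 t =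
      (if max t 0 < ((PySem.List.sorted ((pySplit line " ").map PySem.Str.len) (fun x => x) false).length : Int)
       then PySem.List.pyGetD (PySem.List.sorted ((pySplit line " ").map PySem.Str.len) (fun x => x) false) (max t 0) 0
       else 0) := by
  rw [make_len_dict_eq_counter, PySem.Dict.keys_counter]
  rw [find_del_len_spec ((pySplit line " ").map PySem.Str.len) _
    (PySem.List.sorted_ofList_pairwise_lt _)
    (fun k hk => (PySem.Set.mem_ofList _ _).mp ((PySem.List.mem_sorted _ _ _ _).mp hk)) 0 t]
  rw [← sorted_eq_flatMap_replicate]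
  simp

theorem proc_line_eq (body : String) (lv : Int) :
    proc_line_mask_short_word body lv 30 =
      (let words := pySplit body " "
       let lengths := PySem.List.sorted (words.map PySem.Str.len) (fun x => x) false
       let k := max (lv - 30 + 1) 0
       let w_del_len := if k < (lengths.length : Int) then PySem.List.pyGetD lengths k 0 else 0
       PySem.Str.join " " (words.map (fun w =>
         if PySem.Str.len w ≤ w_del_len then maskOf (PySem.Str.len w) else w))) := by
  simp only [proc_line_mask_short_word]
  rw [foldl_if_append_pair (fun w => PySem.Str.len w ≤ _) (fun w => maskOf (PySem.Str.len w)) (fun w => w)]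
  rw [del_len_eq]
  simp

-- ===== VERDICT (by name: the statement is the Claim_ definition above) =====
theorem proc_txt_lv30_39_mask_short_word_spec : Claim_equal_proc_txt_lv30_39_mask_short_word := by
  intro lines lv _
  unfold Spec_proc_txt_lv30_39_mask_short_word
  simp only [proc_txt_lv30_39_mask_short_word, proc_txt_lv30_39_mask_short_word_alt]
  rw [foldl_if_append_pair (fun line => is_memory_line (line_to_number_body_pair line) = true)]
  simp only [List.nil_append]
  refine List.map_congr_left (fun line _ => ?_)
  simp only [line_to_number_body_pair, is_memory_line]
  by_cases h : PySem.Str.strip (PySem.Str.strip (PySem.Str.join "." (PySem.List.slice (pySplit (PySem.Str.strip line) ".") (some 1) none))) == ""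
  · simp [h]
  · simp only [h, Bool.false_eq_true, if_false, if_true]
    rw [proc_line_eq]
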